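-- pv_equiv track=rewrite | github.com/carteras/ProgrammingAtHawker | 2019/Python/ciphers/freq_analysis.py | get_frequency_order
-- ===== SOURCE A (Python) =====
-- ETAOIN = 'ETAOINSHRDLCUMWFGYPBVKJXQZ'
--
-- LETTERS = 'ABCDEFGHIJKLMNOPQRSTUVWXYZ'
--
-- def get_letter_count(mesesage):
--     letter_count = {
--         'A': 0, 'B': 0, 'C': 0, 'D': 0, 'E': 0, 'F': 0,
--         'G': 0, 'H': 0, 'I': 0, 'J': 0, 'K': 0, 'L': 0, 'M': 0, 'N': 0,
--         'O': 0, 'P': 0, 'Q': 0, 'R': 0, 'S': 0, 'T': 0, 'U': 0, 'V': 0,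
--         'W': 0, 'X': 0, 'Y': 0, 'Z': 0, '.': 0, ',': 0, '!': 0, ' ': 0,
--         '?': 0
--     }
--     for letter in mesesage.upper():
--         if letter not in letter_count:
--             letter_count[letter] = 0
--         if letter in LETTERS:
--             letter_count[letter] += 1
--     return letter_count
--
-- def get_item_at_index_zero(items):
--     return items[0]
--
-- def get_frequency_order(message):
--     letter_to_frequency = get_letter_count(message)
--     frequency_to_letter = {}
--     for letter in LETTERS:
--         if letter_to_frequency[letter] not in frequency_to_letter:
--             frequency_to_letter[letter_to_frequency[letter]] = [letter]
--         else:
--             frequency_to_letter[letter_to_frequency[letter]].append(letter)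
--
--     for freq in frequency_to_letter:
--         frequency_to_letter[freq].sort(key=ETAOIN.find, reverse=True)
--         frequency_to_letter[freq] = ''.join(frequency_to_letter[freq])
--     freq_pairs = list(frequency_to_letter.items())
--     freq_pairs.sort(key=get_item_at_index_zero, reverse=True)
--
--     freq_order = []
--     for freq_pair in freq_pairs:
--         freq_order.append(freq_pair[1])
--
--     return ''.join(freq_order)
-- ===== SOURCE B (Python) =====
-- ETAOIN = 'ETAOINSHRDLCUMWFGYPBVKJXQZ'
--
-- LETTERS = 'ABCDEFGHIJKLMNOPQRSTUVWXYZ'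
--
-- def get_frequency_order(message):
--     counts = {letter: 0 for letter in LETTERS}
--     for ch in message.upper():
--         if ch in counts:
--             counts[ch] += 1
--     # single composite-key sort: count descending, then ETAOIN position
--     # descending; ETAOIN.find(L) lies in [0, 26), so one integer key suffices
--     return ''.join(sorted(LETTERS, key=lambda L: counts[L] * 26 + ETAOIN.find(L), reverse=True))
-- ===== Notes on version B (the rewrite author's own statement) =====
-- stated objective: simpler
-- what changed: A buckets letters by frequency in a dict, sorts each bucket by ETAOIN position (reversed), then sorts the buckets by frequency (reversed) and concatenates; B counts letters once and does a single composite-key sort of the alphabet (count descending, ETAOIN position descending).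
import Mathlib
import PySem

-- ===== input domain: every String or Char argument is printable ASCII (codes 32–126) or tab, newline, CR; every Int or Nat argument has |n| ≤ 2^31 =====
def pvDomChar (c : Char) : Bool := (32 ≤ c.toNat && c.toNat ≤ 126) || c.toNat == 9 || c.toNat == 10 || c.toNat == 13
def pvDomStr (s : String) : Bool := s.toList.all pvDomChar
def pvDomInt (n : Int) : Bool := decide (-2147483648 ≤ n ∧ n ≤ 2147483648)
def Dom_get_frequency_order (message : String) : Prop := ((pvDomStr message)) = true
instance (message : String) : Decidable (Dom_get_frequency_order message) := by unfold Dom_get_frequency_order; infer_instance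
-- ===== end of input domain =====

-- B replaces A's frequency-bucket dict, per-bucket ETAOIN sort and bucket-by-frequency sort
-- with one composite-key sort of the alphabet (count desc, ETAOIN position desc); objective: simpler.

-- ===== PORT A =====
-- module constants ETAOIN and LETTERS (shared by both programs)
def pvETAOIN : List Char := ['E','T','A','O','I','N','S','H','R','D','L','C','U','M','W','F','G','Y','P','B','V','K','J','X','Q','Z']

def pvLETTERS : List Char := ['A','B','C','D','E','F','G','H','I','J','K','L','M','N','O','P','Q','R','S','T','U','V','W','X','Y','Z']

def get_letter_count (mesesage : String) : PySem.Dict Char Int :=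
  let letter_count : PySem.Dict Char Int := PySem.Dict.ofList
    [('A',0),('B',0),('C',0),('D',0),('E',0),('F',0),('G',0),('H',0),('I',0),('J',0),
     ('K',0),('L',0),('M',0),('N',0),('O',0),('P',0),('Q',0),('R',0),('S',0),('T',0),
     ('U',0),('V',0),('W',0),('X',0),('Y',0),('Z',0),('.',0),(',',0),('!',0),(' ',0),('?',0)]
  (PySem.Chars.upper mesesage.toList).foldl (fun lc letter =>
    let lc' := if ¬ lc.contains letter then lc.insert letter 0 else lc
    if PySem.Chars.isIn [letter] pvLETTERS then lc'.insert letter (lc'.getD letter 0 + 1) else lc')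
    letter_count

def get_item_at_index_zero (items : Int × String) : Int := items.1

def get_frequency_order (message : String) : String :=
  let letter_to_frequency := get_letter_count message
  let frequency_to_letter : PySem.Dict Int (List Char) :=
    pvLETTERS.foldl (fun d letter =>
      if ¬ d.contains (letter_to_frequency.getD letter 0) then
        d.insert (letter_to_frequency.getD letter 0) [letter]
      else
        d.insert (letter_to_frequency.getD letter 0)
          (d.getD (letter_to_frequency.getD letter 0) [] ++ [letter])) PySem.Dict.empty
  let frequency_to_letter2 : PySem.Dict Int String := PySem.Dict.mk
    (frequency_to_letter.items.map (fun p =>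
      (p.1, String.ofList (PySem.List.sorted p.2 (fun c => PySem.Chars.find pvETAOIN [c]) true))))
  let freq_pairs := PySem.List.sorted frequency_to_letter2.items get_item_at_index_zero true
  let freq_order := freq_pairs.foldl (fun acc p => acc ++ [p.2]) []
  PySem.Str.join "" freq_order

-- ===== PORT B =====
def get_frequency_order_alt (message : String) : String :=
  let counts0 : PySem.Dict Char Int := PySem.Dict.ofList (pvLETTERS.map (fun letter => (letter, 0)))
  let counts := (PySem.Chars.upper message.toList).foldl
    (fun d ch => if d.contains ch then d.insert ch (d.getD ch 0 + 1) else d) counts0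
  String.ofList (PySem.List.sorted pvLETTERS
    (fun L => counts.getD L 0 * 26 + PySem.Chars.find pvETAOIN [L]) true)

-- ===== PRECONDITION & SPEC =====
def Spec_get_frequency_order (message : String) (out : String) : Prop := out = get_frequency_order_alt message
instance (message : String) (out : String) : Decidable (Spec_get_frequency_order message out) := by unfold Spec_get_frequency_order; infer_instance

-- ===== CLAIM (what is proved, stated in full; the proofs are below) =====
def Claim_equal_get_frequency_order : Prop := ∀ (message : String), Dom_get_frequency_order message → Spec_get_frequency_order message (get_frequency_order message)

-- ===== LEMMAS AND PROOFS =====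

lemma pvIsIn_singleton (c : Char) : PySem.Chars.isIn [c] pvLETTERS = decide (c ∈ pvLETTERS) := by
  by_cases h : c ∈ pvLETTERS
  · simp [h, PySem.Chars.isIn_iff_infix, List.singleton_infix_iff]
  · simp [h, PySem.Chars.isIn_eq_false_iff, List.singleton_infix_iff]

-- A's counting step, named for the induction
def pvStepA (lc : PySem.Dict Char Int) (letter : Char) : PySem.Dict Char Int :=
  let lc' := if ¬ lc.contains letter then lc.insert letter 0 else lc
  if PySem.Chars.isIn [letter] pvLETTERS then lc'.insert letter (lc'.getD letter 0 + 1) else lc'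

lemma pvStepA_contains (d : PySem.Dict Char Int) (a c : Char) (hd : d.contains c = true) :
    (pvStepA d a).contains c = true := by
  unfold pvStepA
  split_ifs <;> simp [PySem.Dict.contains_insert, hd]

lemma pvCountA_loop (u : List Char) (d : PySem.Dict Char Int) (c : Char)
    (hc : c ∈ pvLETTERS) (hd : d.contains c = true) :
    (u.foldl pvStepA d).getD c 0 = d.getD c 0 + (u.count c : Int) := by
  induction u generalizing d with
  | nil => simp
  | cons a u ih =>
    rw [List.foldl_cons, ih _ (pvStepA_contains d a c hd)]
    have hgd : (pvStepA d a).getD c 0 = d.getD c 0 + if c = a then 1 else 0 := by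
      by_cases hac : c = a
      · subst hac
        have hin : c ∈ pvLETTERS := hc
        rw [show pvStepA d c = d.insert c (d.getD c 0 + 1) from by
          simp [pvStepA, pvIsIn_singleton, hd, hin]]
        simp
      · unfold pvStepA
        split_ifs <;> simp_all [PySem.Dict.getD_insert]
    rw [hgd, List.count_cons]
    by_cases hac : c = a
    · simp only [hac, BEq.rfl, ite_true]; push_cast; ring
    · simp [hac, Ne.symm hac]

-- B's counting step, named for the induction
def pvStepB (d : PySem.Dict Char Int) (ch : Char) : PySem.Dict Char Int :=
  if d.contains ch then d.insert ch (d.getD ch 0 + 1) else d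

lemma pvStepB_contains (d : PySem.Dict Char Int) (a c : Char) (hd : d.contains c = true) :
    (pvStepB d a).contains c = true := by
  unfold pvStepB
  split_ifs <;> simp [PySem.Dict.contains_insert, hd]

lemma pvCountB_loop (u : List Char) (d : PySem.Dict Char Int) (c : Char)
    (hd : d.contains c = true) :
    (u.foldl pvStepB d).getD c 0 = d.getD c 0 + (u.count c : Int) := by
  induction u generalizing d with
  | nil => simp
  | cons a u ih =>
    rw [List.foldl_cons, ih _ (pvStepB_contains d a c hd)]
    have hgd : (pvStepB d a).getD c 0 = d.getD c 0 + if c = a then 1 else 0 := by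
      by_cases hac : c = a
      · subst hac
        rw [show pvStepB d c = d.insert c (d.getD c 0 + 1) from by simp [pvStepB, hd]]
        simp
      · unfold pvStepB
        split_ifs <;> simp_all [PySem.Dict.getD_insert]
    rw [hgd, List.count_cons]
    by_cases hac : c = a
    · simp only [hac, BEq.rfl, ite_true]; push_cast; ring
    · simp [hac, Ne.symm hac]

-- the letter count (as Int) of c in the upper-cased message
def pvCnt (u : List Char) (c : Char) : Int := (u.count c : Int)

set_option maxRecDepth 4096 in
lemma pvCountA (message : String) (c : Char) (hc : c ∈ pvLETTERS) :
    (get_letter_count message).getD c 0 = pvCnt (PySem.Chars.upper message.toList) c := by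
  show ((PySem.Chars.upper message.toList).foldl pvStepA _).getD c 0 = _
  rw [pvCountA_loop _ _ c hc (by fin_cases hc <;> decide)]
  have : (PySem.Dict.ofList
    [('A',(0:Int)),('B',0),('C',0),('D',0),('E',0),('F',0),('G',0),('H',0),('I',0),('J',0),
     ('K',0),('L',0),('M',0),('N',0),('O',0),('P',0),('Q',0),('R',0),('S',0),('T',0),
     ('U',0),('V',0),('W',0),('X',0),('Y',0),('Z',0),('.',0),(',',0),('!',0),(' ',0),('?',0)]).getD c 0 = 0 := by
    fin_cases hc <;> decide
  rw [this]; simp [pvCnt]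

-- letters whose count is f, in alphabet order
def pvBucket (κ : Char → Int) (f : Int) : List Char := pvLETTERS.filter (fun c => κ c == f)

-- A's grouping step is a Dict.modify
lemma pvGroupStep (d : PySem.Dict Int (List Char)) (k : Int) (c : Char) :
    (if ¬ d.contains k then d.insert k [c] else d.insert k (d.getD k [] ++ [c]))
      = d.modify k [] (· ++ [c]) := by
  by_cases h : d.contains k
  · simp [PySem.Dict.modify, h]
  · simp [PySem.Dict.modify, h, PySem.Dict.getD_of_not_contains d [] (by simpa using h)]

lemma pvGroup_items (κ : Char → Int) :
    (pvLETTERS.foldl (fun d c => d.modify (κ c) [] (· ++ [c])) PySem.Dict.empty).items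
      = (PySem.Set.ofList (pvLETTERS.map κ)).map (fun f => (f, pvBucket κ f)) := by
  have hnd : (pvLETTERS.foldl (fun d c => d.modify (κ c) [] (· ++ [c])) PySem.Dict.empty).keys.Nodup :=
    PySem.Dict.nodup_keys_foldl_modify_key pvLETTERS κ [] (fun _ c => (· ++ [c])) _ (by simp)
  have hkeys : (pvLETTERS.foldl (fun d c => d.modify (κ c) [] (· ++ [c])) PySem.Dict.empty).keys
      = PySem.Set.ofList (pvLETTERS.map κ) := by
    rw [PySem.Dict.keys_foldl_modify_key pvLETTERS κ [] (fun _ c => (· ++ [c]))]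
    rw [show (PySem.Dict.empty : PySem.Dict Int (List Char)).keys = [] from rfl,
      PySem.Set.update_nil_left]
  have hgd : ∀ f, (pvLETTERS.foldl (fun d c => d.modify (κ c) [] (· ++ [c])) PySem.Dict.empty).getD f []
      = pvBucket κ f := by
    intro f
    have : pvLETTERS.foldl (fun d c => d.modify (κ c) [] (· ++ [c])) PySem.Dict.empty
        = (pvLETTERS.map (fun c => (κ c, c))).foldl (fun d p => d.modify p.1 [] (· ++ [p.2])) PySem.Dict.empty := by
      rw [List.foldl_map]
    rw [this, PySem.Dict.getD_foldl_modify_append]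
    simp [pvBucket, List.filter_map, Function.comp_def]
  rw [PySem.Dict.items_eq_map_keys _ hnd [], hkeys]
  exact List.map_congr_left (fun f _ => by rw [hgd f])

lemma pvSum_ite (K : List Int) (hnd : K.Nodup) (k : Int) (n : Nat) :
    (K.map (fun f => if k = f then n else 0)).sum = if k ∈ K then n else 0 := by
  induction K with
  | nil => simp
  | cons a K ih =>
    rcases List.nodup_cons.mp hnd with ⟨ha, hK⟩
    by_cases hk : k = a
    · subst hk
      simp [ih hK, ha]
    · simp [hk, ih hK]

lemma pvLETTERS_nodup : pvLETTERS.Nodup := by decide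

lemma pvBuckets_perm (κ : Char → Int) :
    ((PySem.Set.ofList (pvLETTERS.map κ)).map (fun f => pvBucket κ f)).flatten.Perm pvLETTERS := by
  rw [List.perm_iff_count]
  intro c
  rw [List.count_flatten, List.map_map]
  have hcnt : ∀ f, (pvBucket κ f).count c = if κ c = f then pvLETTERS.count c else 0 := by
    intro f
    by_cases h : κ c = f
    · rw [if_pos h]
      exact List.count_filter (by simp [h])
    · rw [if_neg h]
      exact List.count_eq_zero.mpr (by simp [pvBucket, List.mem_filter, h])
  have : ((PySem.Set.ofList (pvLETTERS.map κ)).map ((List.count c) ∘ (fun f => pvBucket κ f)))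
      = (PySem.Set.ofList (pvLETTERS.map κ)).map (fun f => if κ c = f then pvLETTERS.count c else 0) :=
    List.map_congr_left (fun f _ => by simp [Function.comp, hcnt f])
  rw [this, pvSum_ite _ (PySem.Set.nodup_ofList _) _ _]
  by_cases hc : c ∈ pvLETTERS
  · rw [if_pos (by rw [PySem.Set.mem_ofList]; exact List.mem_map_of_mem hc)]
  · rw [List.count_eq_zero.mpr hc, ite_self]

lemma pvJoin_nil (parts : List (List Char)) : PySem.Chars.join [] parts = parts.flatten := by
  induction parts with
  | nil => simp [PySem.Chars.join_nil]
  | cons p rest ih =>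
    cases rest with
    | nil => simp [PySem.Chars.join_singleton]
    | cons q rest' => rw [PySem.Chars.join_cons_cons]; simp_all

-- A's output characters, in closed form
lemma pvA_chars (message : String) :
    (get_frequency_order message).toList =
      ((PySem.List.sorted
          ((PySem.Set.ofList (pvLETTERS.map (pvCnt (PySem.Chars.upper message.toList)))).map
            (fun f => (f, String.ofList (PySem.List.sorted (pvBucket (pvCnt (PySem.Chars.upper message.toList)) f)
                (fun c => PySem.Chars.find pvETAOIN [c]) true))))
          get_item_at_index_zero true).map (fun p => p.2.toList)).flatten := by
  simp only [get_frequency_order]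
  rw [PySem.List.foldl_congr_mem pvLETTERS _
    (fun d c => PySem.Dict.modify d (pvCnt (PySem.Chars.upper message.toList) c) [] (· ++ [c]))
    PySem.Dict.empty
    (fun d c hc => by rw [pvCountA message c hc, pvGroupStep])]
  rw [pvGroup_items, List.map_map]
  rw [PySem.List.foldl_append_singleton_eq_map (fun p : Int × String => p.2)]
  rw [PySem.Str.toList_join]
  rw [show ("" : String).toList = [] from rfl, pvJoin_nil]
  simp only [List.nil_append, List.map_map, Function.comp_def]

set_option maxRecDepth 200000 in
lemma pvFind_bounds : ∀ c ∈ pvLETTERS, 0 ≤ PySem.Chars.find pvETAOIN [c] ∧ PySem.Chars.find pvETAOIN [c] < 26 := by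
  intro c hc; fin_cases hc <;> constructor <;> decide

set_option maxRecDepth 200000 in
lemma pvFind_vals : pvLETTERS.map (fun c => PySem.Chars.find pvETAOIN [c]) =
    [2, 19, 11, 9, 0, 15, 16, 7, 4, 22, 21, 10, 13, 5, 3, 18, 24, 8, 6, 1, 12, 20, 14, 23, 17, 25] := by
  simp only [pvLETTERS, List.map_cons, List.map_nil, List.cons.injEq]
  and_intros <;> decide

lemma pvFind_inj : ∀ a ∈ pvLETTERS, ∀ b ∈ pvLETTERS, a ≠ b →
    PySem.Chars.find pvETAOIN [a] ≠ PySem.Chars.find pvETAOIN [b] := by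
  intro a ha b hb hne heq
  exact hne (List.inj_on_of_nodup_map (by rw [pvFind_vals]; decide) ha hb heq)

-- the composite key B sorts by, for count function κ
def pvKey (κ : Char → Int) (c : Char) : Int := κ c * 26 + PySem.Chars.find pvETAOIN [c]

lemma pvMem_sorted_bucket (κ : Char → Int) (f : Int) (x : Char)
    (hx : x ∈ PySem.List.sorted (pvBucket κ f) (fun c => PySem.Chars.find pvETAOIN [c]) true) :
    x ∈ pvLETTERS ∧ κ x = f := by
  rw [PySem.List.mem_sorted] at hx
  simpa [pvBucket, List.mem_filter] using hx

lemma pvA_perm (message : String) :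
    (get_frequency_order message).toList.Perm pvLETTERS := by
  rw [pvA_chars]
  set κ := pvCnt (PySem.Chars.upper message.toList) with hκ
  refine List.Perm.trans ?_ (pvBuckets_perm κ)
  refine List.Perm.trans (List.Perm.flatten (List.Perm.map _ (PySem.List.sorted_perm _ _ _))) ?_
  rw [List.map_map]
  apply List.Perm.flatten_congr
  have : ∀ f ∈ PySem.Set.ofList (pvLETTERS.map κ),
      ((fun p : Int × String => p.2.toList) ∘ (fun f => (f, String.ofList (PySem.List.sorted (pvBucket κ f) (fun c => PySem.Chars.find pvETAOIN [c]) true)))) f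
        = PySem.List.sorted (pvBucket κ f) (fun c => PySem.Chars.find pvETAOIN [c]) true := by
    intro f _; simp
  rw [List.map_congr_left this]
  rw [List.forall₂_map_right_iff, List.forall₂_map_left_iff]
  exact List.forall₂_same.mpr (fun f _ => PySem.List.sorted_perm _ _ _)

lemma pvA_pairwise (message : String) :
    (get_frequency_order message).toList.Pairwise
      (fun a b => pvKey (pvCnt (PySem.Chars.upper message.toList)) b < pvKey (pvCnt (PySem.Chars.upper message.toList)) a) := by
  rw [pvA_chars]
  set κ := pvCnt (PySem.Chars.upper message.toList) with hκ
  set fnd := fun c => PySem.Chars.find pvETAOIN [c] with hfnd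
  rw [List.pairwise_flatten]
  constructor
  · intro l hl
    obtain ⟨p, hp, rfl⟩ := List.mem_map.mp hl
    rw [PySem.List.mem_sorted] at hp
    obtain ⟨f, _, rfl⟩ := List.mem_map.mp hp
    simp only [String.toList_ofList]
    have hnd : (PySem.List.sorted (pvBucket κ f) fnd true).Nodup :=
      ((PySem.List.sorted_perm _ _ _).nodup_iff).mpr (List.Nodup.filter _ pvLETTERS_nodup)
    have hle := PySem.List.sorted_pairwise_rev (pvBucket κ f) fnd
    refine (List.Pairwise.and hle (List.nodup_iff_pairwise_ne.mp hnd)).imp_of_mem ?_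
    intro a b ha hb hab
    obtain ⟨haL, haf⟩ := pvMem_sorted_bucket κ f a ha
    obtain ⟨hbL, hbf⟩ := pvMem_sorted_bucket κ f b hb
    have hlt : fnd b < fnd a :=
      lt_of_le_of_ne hab.1 (pvFind_inj b hbL a haL (Ne.symm hab.2))
    simp only [pvKey, haf, hbf]
    linarith
  · rw [List.pairwise_map]
    have h1 := PySem.List.sorted_pairwise_rev
      ((PySem.Set.ofList (pvLETTERS.map κ)).map
        (fun f => (f, String.ofList (PySem.List.sorted (pvBucket κ f) fnd true))))
      get_item_at_index_zero
    have hnfst : ((PySem.List.sorted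
        ((PySem.Set.ofList (pvLETTERS.map κ)).map
          (fun f => (f, String.ofList (PySem.List.sorted (pvBucket κ f) fnd true))))
        get_item_at_index_zero true).map (fun p => p.1)).Nodup := by
      refine (List.Perm.nodup_iff (List.Perm.map _ (PySem.List.sorted_perm _ _ _))).mpr ?_
      rw [List.map_map]
      have : ((fun p : Int × String => p.1) ∘ (fun f => (f, String.ofList (PySem.List.sorted (pvBucket κ f) fnd true)))) = id := rfl
      rw [this, List.map_id]
      exact PySem.Set.nodup_ofList _
    have h2 := List.pairwise_map.mp (List.nodup_iff_pairwise_ne.mp hnfst)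
    refine (List.Pairwise.and h1 h2).imp_of_mem ?_
    intro p q hp hq hpq
    rw [PySem.List.mem_sorted] at hp hq
    obtain ⟨f, _, rfl⟩ := List.mem_map.mp hp
    obtain ⟨g, _, rfl⟩ := List.mem_map.mp hq
    intro x hx y hy
    simp only [String.toList_ofList] at hx hy
    obtain ⟨hxL, hxf⟩ := pvMem_sorted_bucket κ f x hx
    obtain ⟨hyL, hyg⟩ := pvMem_sorted_bucket κ g y hy
    have hgf : g < f := lt_of_le_of_ne (by simpa [get_item_at_index_zero] using hpq.1)
      (fun h => hpq.2 h.symm)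
    have hbx := pvFind_bounds x hxL
    have hby := pvFind_bounds y hyL
    simp only [pvKey, hxf, hyg]
    have : g + 1 ≤ f := hgf
    nlinarith

set_option maxRecDepth 4096 in
lemma pvCountB (message : String) (c : Char) (hc : c ∈ pvLETTERS) :
    ((PySem.Chars.upper message.toList).foldl
        (fun d ch => if d.contains ch then d.insert ch (d.getD ch 0 + 1) else d)
        (PySem.Dict.ofList (pvLETTERS.map (fun letter => (letter, 0))))).getD c 0
      = pvCnt (PySem.Chars.upper message.toList) c := by
  show ((PySem.Chars.upper message.toList).foldl pvStepB _).getD c 0 = _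
  rw [pvCountB_loop _ _ c (by fin_cases hc <;> decide)]
  have : (PySem.Dict.ofList (pvLETTERS.map (fun letter => (letter, (0:Int))))).getD c 0 = 0 := by
    fin_cases hc <;> decide
  rw [this]; simp [pvCnt]

-- ===== VERDICT (by name: the statement is the Claim_ definition above) =====
theorem get_frequency_order_spec : Claim_equal_get_frequency_order := by
  intro message _
  show get_frequency_order message = get_frequency_order_alt message
  apply String.toList_inj.mp
  simp only [get_frequency_order_alt, String.toList_ofList]
  rw [PySem.List.sorted_rev_eq_of_perm_of_pairwise_gt pvLETTERS
    (get_frequency_order message).toList _ (pvA_perm message) ?_]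
  refine (pvA_pairwise message).imp_of_mem ?_
  intro a b ha hb hab
  have haL : a ∈ pvLETTERS := (pvA_perm message).mem_iff.mp ha
  have hbL : b ∈ pvLETTERS := (pvA_perm message).mem_iff.mp hb
  rw [pvCountB message a haL, pvCountB message b hbL]
  simpa [pvKey] using hab
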